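-- pv_equiv track=rewrite | github.com/Ayuto/EventScripts-Emulator | es_emulator/helpers.py | _get_menu_options
-- ===== SOURCE A (Python) =====
-- def _get_menu_options(keys):
--     if not keys:
--         return 1023
--
--     result = 0
--     for x in range(10):
--         if str(x) in keys:
--             result += 1 << x
--
--     return result
-- ===== SOURCE B (Python) =====
-- DIGITS = ('0', '1', '2', '3', '4', '5', '6', '7', '8', '9')
--
-- def _get_menu_options(keys):
--     if not keys:
--         return 1023
--     seen = set()
--     for k in keys:
--         if k in DIGITS:
--             seen.add(k)
--     return sum(1 << int(k) for k in seen)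
-- ===== Notes on version B (the rewrite author's own statement) =====
-- stated objective: alternative
-- what changed: Instead of scanning range(10) and testing each digit string for membership in keys (10 full scans of keys), B makes one pass over keys collecting the digit strings it contains into a set and sums one bit per collected digit.
import Mathlib
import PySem

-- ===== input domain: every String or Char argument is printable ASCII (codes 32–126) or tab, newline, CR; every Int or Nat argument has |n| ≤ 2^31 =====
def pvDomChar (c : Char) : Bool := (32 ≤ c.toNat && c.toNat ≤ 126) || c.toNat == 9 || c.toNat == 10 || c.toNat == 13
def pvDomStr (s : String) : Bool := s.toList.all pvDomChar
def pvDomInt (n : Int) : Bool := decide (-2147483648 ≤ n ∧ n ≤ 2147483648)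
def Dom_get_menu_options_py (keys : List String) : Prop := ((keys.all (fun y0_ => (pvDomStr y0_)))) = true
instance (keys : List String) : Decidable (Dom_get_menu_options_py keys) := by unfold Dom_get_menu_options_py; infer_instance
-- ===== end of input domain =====

-- B replaces A's ten membership scans of `keys` by a single pass over `keys` that
-- collects the digit strings present into a set and sums one bit per collected digit
-- (alternative decomposition; same result).

-- ===== PORT A =====
def get_menu_options_py (keys : List String) : Int :=
  if keys = [] then 1023
  else
    (PySem.List.pyRange 0 10 1).foldl
      (fun result x =>
        if PySem.Int.toStr x ∈ keys then result + 2 ^ x.toNat else result)  -- 1 << x = 2 ^ x (x ≥ 0 here)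
      0

-- ===== PORT B =====
def pvDigitsB : List String := ["0", "1", "2", "3", "4", "5", "6", "7", "8", "9"]

def get_menu_options_py_alt (keys : List String) : Int :=
  if keys = [] then 1023
  else
    let seen : PySem.Set String :=
      keys.foldl (fun s k => if k ∈ pvDigitsB then PySem.Set.add s k else s) PySem.Set.empty
    -- sum over the set's elements: Int addition commutes, so Python's set iteration order is immaterial
    (seen.map (fun k => (2 : Int) ^ ((PySem.Int.ofStr? k).getD 0).toNat)).sum  -- 1 << int(k); int(k) succeeds since k is a digit string

-- ===== PRECONDITION & SPEC =====
def Spec_get_menu_options_py (keys : List String) (out : Int) : Prop := out = get_menu_options_py_alt keys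
instance (keys : List String) (out : Int) : Decidable (Spec_get_menu_options_py keys out) := by unfold Spec_get_menu_options_py; infer_instance

-- ===== CLAIM (what is proved, stated in full; the proofs are below) =====
def Claim_equal_get_menu_options_py : Prop := ∀ (keys : List String), Dom_get_menu_options_py keys → Spec_get_menu_options_py keys (get_menu_options_py keys)

-- ===== LEMMAS AND PROOFS =====

def pvBitv (d : String) : Int := (2 : Int) ^ ((PySem.Int.ofStr? d).getD 0).toNat

-- the set built by B's loop: nodup, and membership = "digit string occurring in keys"
theorem pvSeen_spec (keys : List String) :
    ∀ s : List String, s.Nodup →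
      (keys.foldl (fun s k => if k ∈ pvDigitsB then PySem.Set.add s k else s) s).Nodup ∧
      (∀ c, c ∈ keys.foldl (fun s k => if k ∈ pvDigitsB then PySem.Set.add s k else s) s ↔
        c ∈ s ∨ (c ∈ pvDigitsB ∧ c ∈ keys)) := by
  induction keys with
  | nil => intro s hs; simpa using hs
  | cons k ks ih =>
    intro s hs
    simp only [List.foldl_cons]
    by_cases hk : k ∈ pvDigitsB
    · rw [if_pos hk]
      obtain ⟨h1, h2⟩ := ih (PySem.Set.add s k) (PySem.Set.nodup_add s k hs)
      refine ⟨h1, fun c => ?_⟩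
      rw [h2 c, PySem.Set.mem_add]
      constructor
      · rintro ((h | rfl) | ⟨hd, hm⟩)
        · exact Or.inl h
        · exact Or.inr ⟨hk, List.mem_cons_self ..⟩
        · exact Or.inr ⟨hd, List.mem_cons_of_mem _ hm⟩
      · rintro (h | ⟨hd, hm⟩)
        · exact Or.inl (Or.inl h)
        · rcases List.mem_cons.mp hm with rfl | hm
          · exact Or.inl (Or.inr rfl)
          · exact Or.inr ⟨hd, hm⟩
    · rw [if_neg hk]
      obtain ⟨h1, h2⟩ := ih s hs
      refine ⟨h1, fun c => ?_⟩
      rw [h2 c]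
      constructor
      · rintro (h | ⟨hd, hm⟩)
        · exact Or.inl h
        · exact Or.inr ⟨hd, List.mem_cons_of_mem _ hm⟩
      · rintro (h | ⟨hd, hm⟩)
        · exact Or.inl h
        · rcases List.mem_cons.mp hm with rfl | hm
          · exact absurd hd hk
          · exact Or.inr ⟨hd, hm⟩

-- a filtered-map sum is the fold that adds f d whenever the predicate holds
theorem pvFoldFilter (keys : List String) (f : String → Int) :
    ∀ (ds : List String) (r : Int),
      ds.foldl (fun r d => if d ∈ keys then r + f d else r) r =
        r + ((ds.filter (fun d => decide (d ∈ keys))).map f).sum := by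
  intro ds
  induction ds with
  | nil => intro r; simp
  | cons d ds ih =>
    intro r
    by_cases hd : d ∈ keys <;> simp [hd, ih, add_assoc]

theorem get_menu_options_py_spec : Claim_equal_get_menu_options_py := by
  intro keys _
  unfold Spec_get_menu_options_py get_menu_options_py get_menu_options_py_alt
  by_cases h : keys = []
  · simp [h]
  · rw [if_neg h, if_neg h]
    -- B's set is a permutation of the digits present, in canonical order
    obtain ⟨hnd, hmem⟩ := pvSeen_spec keys PySem.Set.empty List.nodup_nil
    have hperm :
        List.Perm
          (keys.foldl (fun s k => if k ∈ pvDigitsB then PySem.Set.add s k else s)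
            (PySem.Set.empty : PySem.Set String))
          (pvDigitsB.filter (fun d => decide (d ∈ keys))) := by
      rw [List.perm_ext_iff_of_nodup hnd ((by decide : pvDigitsB.Nodup).filter _)]
      intro a
      rw [hmem a, List.mem_filter]
      simp [PySem.Set.empty, And.comm]
    have hsum :
        ((keys.foldl (fun s k => if k ∈ pvDigitsB then PySem.Set.add s k else s)
            PySem.Set.empty).map pvBitv).sum =
          ((pvDigitsB.filter (fun d => decide (d ∈ keys))).map pvBitv).sum :=
      (hperm.map pvBitv).sum_eq
    show (PySem.List.pyRange 0 10 1).foldl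
        (fun result x => if PySem.Int.toStr x ∈ keys then result + 2 ^ x.toNat else result) 0 =
      ((keys.foldl (fun s k => if k ∈ pvDigitsB then PySem.Set.add s k else s)
          PySem.Set.empty).map pvBitv).sum
    rw [hsum, show PySem.List.pyRange 0 10 1 = [0,1,2,3,4,5,6,7,8,9] from by decide]
    have := pvFoldFilter keys pvBitv pvDigitsB 0
    rw [zero_add] at this
    rw [← this]
    simp only [pvDigitsB, List.foldl]
    norm_num [show Int.toNat 0 = 0 from rfl, show Int.toNat 1 = 1 from rfl, show Int.toNat 2 = 2 from rfl, show Int.toNat 3 = 3 from rfl, show Int.toNat 4 = 4 from rfl, show Int.toNat 5 = 5 from rfl, show Int.toNat 6 = 6 from rfl, show Int.toNat 7 = 7 from rfl, show Int.toNat 8 = 8 from rfl, show Int.toNat 9 = 9 from rfl, show PySem.Int.toStr 0 = "0" from by decide, show PySem.Int.toStr 1 = "1" from by decide,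
      show PySem.Int.toStr 2 = "2" from by decide, show PySem.Int.toStr 3 = "3" from by decide,
      show PySem.Int.toStr 4 = "4" from by decide, show PySem.Int.toStr 5 = "5" from by decide,
      show PySem.Int.toStr 6 = "6" from by decide, show PySem.Int.toStr 7 = "7" from by decide,
      show PySem.Int.toStr 8 = "8" from by decide, show PySem.Int.toStr 9 = "9" from by decide,
      show pvBitv "0" = 1 from by decide, show pvBitv "1" = 2 from by decide,
      show pvBitv "2" = 4 from by decide, show pvBitv "3" = 8 from by decide,
      show pvBitv "4" = 16 from by decide, show pvBitv "5" = 32 from by decide,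
      show pvBitv "6" = 64 from by decide, show pvBitv "7" = 128 from by decide,
      show pvBitv "8" = 256 from by decide, show pvBitv "9" = 512 from by decide]
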